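-- pv_equiv track=rewrite | github.com/Zeeeepa/agent | jinx/micro/runtime/patch/symbol_patch_generic.py | _scan_mask
-- ===== SOURCE A (Python) =====
-- def _scan_mask(text: str, lang: str) -> list[bool]:
--     """Return a mask array where True marks positions inside strings/comments.
--     Handles // and /* */ for JavaScript; strings ' " and template literals `...`.
--     """
--     n = len(text)
--     mask = [False] * n
--     i = 0
--     def mark(a: int, b: int):
--         for k in range(max(0, a), min(n, b)):
--             mask[k] = True
--     while i < n:
--         ch = text[i]
--         ch2 = text[i:i+2]
--         # line comment
--         if ch2 == '//' and (lang in ('js',)):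
--             j = i+2
--             while j < n and text[j] != '\n':
--                 j += 1
--             mark(i, j)
--             i = j
--             continue
--         # block comment
--         if ch2 == '/*' and (lang in ('js',)):
--             j = i+2
--             while j < n-1 and text[j:j+2] != '*/':
--                 j += 1
--             j = min(n, j+2)
--             mark(i, j)
--             i = j
--             continue
--         # template string (ts/js)
--         if ch == '`' and (lang in ('js',)):
--             j = i+1
--             esc = False
--             while j < n:
--                 c = text[j]
--                 if esc:
--                     esc = False
--                 elif c == '`':
--                     j += 1
--                     break
--                 elif c == '\\':
--                     esc = True
--                 j += 1
--             mark(i, j)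
--             i = j
--             continue
--         # normal strings ' and "
--         if ch in ('\'', '"'):
--             q = ch
--             j = i+1
--             esc = False
--             while j < n:
--                 c = text[j]
--                 if esc:
--                     esc = False
--                 elif c == q:
--                     j += 1
--                     break
--                 elif c == '\\':
--                     esc = True
--                 j += 1
--             mark(i, j)
--             i = j
--             continue
--         i += 1
--     return mask
-- ===== SOURCE B (Python) =====
-- def _scan_mask(text: str, lang: str) -> list[bool]:
--     """Single-pass finite state machine over the characters."""
--     NORMAL, LINE, BLOCK_OPEN, BLOCK, STRING = 0, 1, 2, 3, 4
--     js = (lang == 'js')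
--     state = NORMAL
--     star = False        # in BLOCK: previous char was '*'
--     esc = False         # in STRING: previous char was an unescaped backslash
--     quote = ''
--     mask = []
--     n = len(text)
--     for i, c in enumerate(text):
--         if state == NORMAL:
--             nxt = text[i + 1] if i + 1 < n else ''
--             if js and c == '/' and nxt == '/':
--                 state = LINE
--                 mask.append(True)
--             elif js and c == '/' and nxt == '*':
--                 state = BLOCK_OPEN
--                 mask.append(True)
--             elif (js and c == '`') or c == "'" or c == '"':
--                 state, quote, esc = STRING, c, False
--                 mask.append(True)
--             else:
--                 mask.append(False)
--         elif state == LINE: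
--             if c == '\n':
--                 state = NORMAL
--                 mask.append(False)
--             else:
--                 mask.append(True)
--         elif state == BLOCK_OPEN:
--             state, star = BLOCK, False
--             mask.append(True)
--         elif state == BLOCK:
--             mask.append(True)
--             if c == '/' and star:
--                 state = NORMAL
--             else:
--                 star = (c == '*')
--         else:  # STRING
--             mask.append(True)
--             if esc:
--                 esc = False
--             elif c == quote:
--                 state = NORMAL
--             elif c == '\\':
--                 esc = True
--     return mask
-- ===== Notes on version B (the rewrite author's own statement) =====
-- stated objective: alternative
-- what changed: A's index-jumping scanner (outer while with per-region inner while loops that search for the end of each comment/string and then mark a range in a preallocated mask) is replaced by a single pass that visits every character exactly once with an explicit finite state machine (NORMAL / LINE / BLOCK_OPEN / BLOCK / STRING with esc flag) and appends one mask bit per character.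
import Mathlib
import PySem

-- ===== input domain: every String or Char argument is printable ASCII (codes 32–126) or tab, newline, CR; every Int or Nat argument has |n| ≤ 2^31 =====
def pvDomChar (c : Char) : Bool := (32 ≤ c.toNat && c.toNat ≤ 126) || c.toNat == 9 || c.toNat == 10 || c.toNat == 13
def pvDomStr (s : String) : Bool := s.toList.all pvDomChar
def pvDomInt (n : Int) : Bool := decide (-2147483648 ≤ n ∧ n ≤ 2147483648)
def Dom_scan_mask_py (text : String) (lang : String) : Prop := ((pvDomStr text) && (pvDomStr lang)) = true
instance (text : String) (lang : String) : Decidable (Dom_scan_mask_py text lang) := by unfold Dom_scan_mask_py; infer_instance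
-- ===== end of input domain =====

-- B replaces A's index-jumping scanner (inner while loops per region) by a single-pass
-- character-by-character finite state machine; objective: alternative decomposition.

-- ===== PORT A =====
-- A's loops are transliterated as structural recursion on a fuel argument; every call
-- supplies fuel n (≥ the remaining iteration count), so behaviour matches the Python loops.
-- inner `while j < n and text[j] != '\n'` loop of the line-comment branch
def lineEndA (cs : List Char) (n : Nat) : Nat → Nat → Nat
  | 0, j => j
  | fuel+1, j => if j < n ∧ cs.getD j ' ' ≠ '\n' then lineEndA cs n fuel (j+1) else j

-- inner `while j < n-1 and text[j:j+2] != '*/'` loop of the block-comment branch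
def blockEndA (cs : List Char) (n : Nat) : Nat → Nat → Nat
  | 0, j => j
  | fuel+1, j =>
    if j < n - 1 ∧ ¬ ((cs.drop j).take 2 = ['*', '/']) then blockEndA cs n fuel (j+1) else j

-- inner string / template-literal scanning loop (shared code in A, parametrised by the quote q)
def strEndA (cs : List Char) (n : Nat) (q : Char) : Nat → Nat → Bool → Nat
  | 0, j, _ => j
  | fuel+1, j, esc =>
    if j < n then
      if esc then strEndA cs n q fuel (j+1) false
      else if cs.getD j ' ' = q then j + 1
      else if cs.getD j ' ' = '\\' then strEndA cs n q fuel (j+1) true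
      else strEndA cs n q fuel (j+1) false
    else j

-- `mark(a, b)`: for k in range(max(0,a), min(n,b)): mask[k] = True
def markA (n : Nat) (mask : List Bool) (a b : Nat) : List Bool :=
  (List.range' (max 0 a) (min n b - max 0 a)).foldl (fun m k => m.set k true) mask

-- A's outer `while i < n` loop
def loopA (cs : List Char) (n : Nat) (lang : String) : Nat → Nat → List Bool → List Bool
  | 0, _, mask => mask
  | fuel+1, i, mask =>
    if i < n then
      if (cs.drop i).take 2 = ['/', '/'] ∧ lang = "js" then
        let j := lineEndA cs n n (i+2)
        loopA cs n lang fuel j (markA n mask i j)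
      else if (cs.drop i).take 2 = ['/', '*'] ∧ lang = "js" then
        let j := min n (blockEndA cs n n (i+2) + 2)
        loopA cs n lang fuel j (markA n mask i j)
      else if cs.getD i ' ' = '`' ∧ lang = "js" then
        let j := strEndA cs n '`' n (i+1) false
        loopA cs n lang fuel j (markA n mask i j)
      else if cs.getD i ' ' = '\'' ∨ cs.getD i ' ' = '"' then
        let j := strEndA cs n (cs.getD i ' ') n (i+1) false
        loopA cs n lang fuel j (markA n mask i j)
      else
        loopA cs n lang fuel (i+1) mask
    else mask

def scan_mask_py (text : String) (lang : String) : List Bool :=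
  loopA text.toList text.toList.length lang text.toList.length 0
    (List.replicate text.toList.length false)

-- ===== PORT B =====
-- the states of B's finite state machine
inductive FState where
  | normal
  | line
  | blockOpen
  | block (star : Bool)
  | str (q : Char) (esc : Bool)
deriving DecidableEq

-- one-pass FSM: emit one mask bit per character, transitioning on delimiters
def fsmB (lang : String) : FState → List Char → List Bool
  | _, [] => []
  | .normal, c :: rest =>
      if lang = "js" ∧ c = '/' ∧ rest.head? = some '/' then true :: fsmB lang .line rest
      else if lang = "js" ∧ c = '/' ∧ rest.head? = some '*' then true :: fsmB lang .blockOpen rest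
      else if (lang = "js" ∧ c = '`') ∨ c = '\'' ∨ c = '"' then true :: fsmB lang (.str c false) rest
      else false :: fsmB lang .normal rest
  | .line, c :: rest =>
      if c = '\n' then false :: fsmB lang .normal rest else true :: fsmB lang .line rest
  | .blockOpen, _ :: rest => true :: fsmB lang (.block false) rest
  | .block star, c :: rest =>
      if c = '/' ∧ star then true :: fsmB lang .normal rest
      else true :: fsmB lang (.block (c = '*')) rest
  | .str q esc, c :: rest =>
      if esc then true :: fsmB lang (.str q false) rest
      else if c = q then true :: fsmB lang .normal rest
      else true :: fsmB lang (.str q (c = '\\')) rest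

def scan_mask_py_alt (text : String) (lang : String) : List Bool :=
  fsmB lang .normal text.toList

-- ===== PRECONDITION & SPEC =====
def Spec_scan_mask_py (text : String) (lang : String) (out : List Bool) : Prop := out = scan_mask_py_alt text lang
instance (text : String) (lang : String) (out : List Bool) : Decidable (Spec_scan_mask_py text lang out) := by unfold Spec_scan_mask_py; infer_instance

-- ===== CLAIM (what is proved, stated in full; the proofs are below) =====
def Claim_equal_scan_mask_py : Prop := ∀ (text : String) (lang : String), Dom_scan_mask_py text lang → Spec_scan_mask_py text lang (scan_mask_py text lang)

-- ===== LEMMAS AND PROOFS =====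

theorem lineEndA_ge (cs : List Char) (n : Nat) : ∀ (f j : Nat), j ≤ lineEndA cs n f j := by
  intro f
  induction f with
  | zero => intro j; simp [lineEndA]
  | succ f ih =>
      intro j
      rw [lineEndA]
      split
      · exact le_trans (by omega) (ih (j+1))
      · exact le_refl j

theorem blockEndA_ge (cs : List Char) (n : Nat) : ∀ (f j : Nat), j ≤ blockEndA cs n f j := by
  intro f
  induction f with
  | zero => intro j; simp [blockEndA]
  | succ f ih =>
      intro j
      rw [blockEndA]
      split
      · exact le_trans (by omega) (ih (j+1))
      · exact le_refl j

theorem strEndA_ge (cs : List Char) (n : Nat) (q : Char) :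
    ∀ (f j : Nat) (esc : Bool), j ≤ strEndA cs n q f j esc := by
  intro f
  induction f with
  | zero => intro j esc; simp [strEndA]
  | succ f ih =>
      intro j esc
      rw [strEndA]
      split
      · split
        · exact le_trans (by omega) (ih (j+1) false)
        · split
          · omega
          · split
            · exact le_trans (by omega) (ih (j+1) true)
            · exact le_trans (by omega) (ih (j+1) false)
      · exact le_refl j

theorem lineEndA_le (cs : List Char) (n : Nat) : ∀ (f j : Nat), lineEndA cs n f j ≤ max j n := by
  intro f
  induction f with
  | zero => intro j; simp [lineEndA]
  | succ f ih =>
      intro j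
      rw [lineEndA]
      split
      · have := ih (j+1); omega
      · omega

theorem strEndA_le (cs : List Char) (n : Nat) (q : Char) :
    ∀ (f j : Nat) (esc : Bool), strEndA cs n q f j esc ≤ max j n := by
  intro f
  induction f with
  | zero => intro j esc; simp [strEndA]
  | succ f ih =>
      intro j esc
      rw [strEndA]
      split
      · split
        · have := ih (j+1) false; omega
        · split
          · omega
          · split
            · have := ih (j+1) true; omega
            · have := ih (j+1) false; omega
      · omega

theorem foldl_set_range' (mask : List Bool) (a len : Nat) (h : a + len ≤ mask.length) :
    (List.range' a len).foldl (fun m k => m.set k true) mask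
      = mask.take a ++ List.replicate len true ++ mask.drop (a + len) := by
  induction len generalizing mask a with
  | zero => simp
  | succ len ih =>
      rw [List.range'_succ, List.foldl_cons, ih (mask.set a true) (a+1) (by simp; omega)]
      rw [List.drop_set_of_lt (by omega), List.take_add_one, List.take_set,
        List.getElem?_set_self (by omega), List.set_eq_of_length_le (by simp),
        (by omega : a + 1 + len = a + (len+1)), List.replicate_succ]
      simp

theorem markA_eq (mask : List Bool) (n a b : Nat) (hlen : mask.length = n)
    (hab : a ≤ b) (hbn : b ≤ n) :
    markA n mask a b = mask.take a ++ List.replicate (b - a) true ++ mask.drop b := by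
  unfold markA
  rw [Nat.max_eq_right (Nat.zero_le a), Nat.min_eq_right hbn,
    foldl_set_range' mask a (b - a) (by omega), (by omega : a + (b - a) = b)]

theorem drop_cons_getD (cs : List Char) (i : Nat) (h : i < cs.length) :
    cs.drop i = cs.getD i ' ' :: cs.drop (i+1) := by
  rw [List.getD_eq_getElem _ _ h, List.drop_eq_getElem_cons h]

theorem take_one_eq_iff_head? {α : Type} (l : List α) (a : α) :
    l.take 1 = [a] ↔ l.head? = some a := by
  cases l <;> simp

theorem head?_of_take_one {α : Type} (l : List α) (a : α) (h : l.take 1 = [a]) :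
    l.head? = some a := (take_one_eq_iff_head? l a).1 h

theorem fsm_line (lang : String) (cs : List Char) : ∀ (f j : Nat), cs.length - j ≤ f →
    fsmB lang .line (cs.drop j)
      = List.replicate (lineEndA cs cs.length f j - j) true
        ++ fsmB lang .normal (cs.drop (lineEndA cs cs.length f j)) := by
  intro f
  induction f with
  | zero =>
      intro j hf
      rw [lineEndA, List.drop_eq_nil_of_le (by omega)]
      simp [fsmB]
  | succ f ih =>
      intro j hf
      rw [lineEndA]
      by_cases h : j < cs.length ∧ cs.getD j ' ' ≠ '\n'
      · rw [if_pos h, drop_cons_getD cs j h.1]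
        simp only [fsmB, if_neg h.2]
        rw [ih (j+1) (by omega)]
        have he : j + 1 ≤ lineEndA cs cs.length f (j+1) := lineEndA_ge cs cs.length f (j+1)
        rw [(by omega : lineEndA cs cs.length f (j+1) - j
              = (lineEndA cs cs.length f (j+1) - (j+1)) + 1),
          List.replicate_succ]
        simp
      · rw [if_neg h]
        simp only [List.replicate_zero, Nat.sub_self, List.nil_append]
        by_cases hj : j < cs.length
        · have hn : cs.getD j ' ' = '\n' := by
            by_contra hne; exact h ⟨hj, hne⟩
          rw [drop_cons_getD cs j hj, hn]
          simp [fsmB]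
        · rw [List.drop_eq_nil_of_le (by omega)]
          simp [fsmB]

theorem fsm_block (lang : String) (cs : List Char) : ∀ (f j : Nat), cs.length - j ≤ f →
    ∀ star : Bool, (star = true → cs.getD j ' ' ≠ '/') →
    fsmB lang (.block star) (cs.drop j)
      = List.replicate (min cs.length (blockEndA cs cs.length f j + 2) - j) true
        ++ fsmB lang .normal (cs.drop (min cs.length (blockEndA cs cs.length f j + 2))) := by
  intro f
  induction f with
  | zero =>
      intro j hf star hside
      rw [blockEndA]
      have hmin : min cs.length (j + 2) = cs.length := by omega
      rw [hmin, List.drop_eq_nil_of_le (by omega), List.drop_eq_nil_of_le (le_refl _),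
        (by omega : cs.length - j = 0)]
      simp [fsmB]
  | succ f ih =>
      intro j hf star hside
      rw [blockEndA]
      by_cases h : j < cs.length - 1 ∧ ¬ ((cs.drop j).take 2 = ['*', '/'])
      · rw [if_pos h]
        have hj : j < cs.length := by omega
        have hj1 : j + 1 < cs.length := by omega
        rw [drop_cons_getD cs j hj]
        simp only [fsmB]
        rw [if_neg (by intro hco; exact hside hco.2 hco.1)]
        rw [ih (j+1) (by omega) _ (by
          intro hst hsl
          have hc : cs.getD j ' ' = '*' := by simpa using hst
          apply h.2
          rw [drop_cons_getD cs j hj, List.take_succ_cons, drop_cons_getD cs (j+1) hj1,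
            List.take_succ_cons, List.take_zero, hc, hsl])]
        have hge : j + 1 ≤ blockEndA cs cs.length f (j+1) := blockEndA_ge cs cs.length f (j+1)
        rw [(by omega : min cs.length (blockEndA cs cs.length f (j+1) + 2) - j
              = (min cs.length (blockEndA cs cs.length f (j+1) + 2) - (j+1)) + 1),
          List.replicate_succ]
        simp
      · rw [if_neg h]
        by_cases hj : j < cs.length
        · by_cases hj1 : j < cs.length - 1
          · -- stopped because text[j:j+2] == '*/'
            have hp : (cs.drop j).take 2 = ['*', '/'] := by
              by_contra hne; exact h ⟨hj1, hne⟩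
            have hj2 : j + 1 < cs.length := by omega
            rw [drop_cons_getD cs j hj, List.take_succ_cons, drop_cons_getD cs (j+1) hj2,
              List.take_succ_cons, List.take_zero] at hp
            simp only [List.cons.injEq, and_true] at hp
            have hc : cs.getD j ' ' = '*' := hp.1
            have hc1 : cs.getD (j+1) ' ' = '/' := hp.2
            have hmin : min cs.length (j + 2) = j + 2 := by omega
            rw [hmin, (by omega : j + 2 - j = 2),
              drop_cons_getD cs j hj, drop_cons_getD cs (j+1) hj2, hc, hc1]
            simp [fsmB]
          · -- j = n - 1
            have hmin : min cs.length (j + 2) = cs.length := by omega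
            rw [hmin, (by omega : cs.length - j = 1),
              drop_cons_getD cs j hj, List.drop_eq_nil_of_le (le_refl _ |>.trans (by omega)),
              List.drop_eq_nil_of_le (le_refl cs.length)]
            by_cases hc : (cs.getD j ' ' = '/' ∧ star = true) <;> simp [fsmB, hc]
        · have hmin : min cs.length (j + 2) = cs.length := by omega
          rw [hmin, List.drop_eq_nil_of_le (by omega), List.drop_eq_nil_of_le (le_refl _),
            (by omega : cs.length - j = 0)]
          simp [fsmB]

theorem fsm_str (lang : String) (cs : List Char) (q : Char) :
    ∀ (f j : Nat), cs.length - j ≤ f → ∀ (esc : Bool),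
    fsmB lang (.str q esc) (cs.drop j)
      = List.replicate (strEndA cs cs.length q f j esc - j) true
        ++ fsmB lang .normal (cs.drop (strEndA cs cs.length q f j esc)) := by
  intro f
  induction f with
  | zero =>
      intro j hf esc
      rw [strEndA, List.drop_eq_nil_of_le (by omega)]
      simp [fsmB]
  | succ f ih =>
      intro j hf esc
      by_cases hj : j < cs.length
      · rw [strEndA, if_pos hj]
        cases esc with
        | true =>
            rw [if_pos rfl, drop_cons_getD cs j hj]
            simp only [fsmB]
            rw [ih (j+1) (by omega) false]
            have hge : j + 1 ≤ strEndA cs cs.length q f (j+1) false :=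
              strEndA_ge cs cs.length q f (j+1) false
            rw [(by omega : strEndA cs cs.length q f (j+1) false - j
                  = (strEndA cs cs.length q f (j+1) false - (j+1)) + 1), List.replicate_succ]
            simp
        | false =>
            rw [if_neg (by simp), drop_cons_getD cs j hj]
            simp only [fsmB, Bool.false_eq_true, if_false]
            by_cases hq : cs.getD j ' ' = q
            · rw [if_pos hq, if_pos hq, (by omega : j + 1 - j = 1)]
              simp
            · rw [if_neg hq, if_neg hq]
              by_cases hbs : cs.getD j ' ' = '\\'
              · rw [if_pos hbs]
                simp only [hbs, decide_true]
                rw [ih (j+1) (by omega) true]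
                have hge : j + 1 ≤ strEndA cs cs.length q f (j+1) true :=
                  strEndA_ge cs cs.length q f (j+1) true
                rw [(by omega : strEndA cs cs.length q f (j+1) true - j
                      = (strEndA cs cs.length q f (j+1) true - (j+1)) + 1), List.replicate_succ]
                simp
              · rw [if_neg hbs]
                simp only [decide_eq_false hbs]
                rw [ih (j+1) (by omega) false]
                have hge : j + 1 ≤ strEndA cs cs.length q f (j+1) false :=
                  strEndA_ge cs cs.length q f (j+1) false
                rw [(by omega : strEndA cs cs.length q f (j+1) false - j
                      = (strEndA cs cs.length q f (j+1) false - (j+1)) + 1), List.replicate_succ]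
                simp
      · rw [strEndA, if_neg hj, List.drop_eq_nil_of_le (by omega)]
        simp [fsmB]

-- one mark-and-jump step of A's outer loop, reduced via the induction hypothesis
theorem mark_step (cs : List Char) (lang : String) (f i j : Nat) (mask : List Bool)
    (ih : ∀ (i : Nat) (mask : List Bool), cs.length - i ≤ f → mask.length = cs.length →
        mask.drop i = List.replicate (cs.length - i) false →
        loopA cs cs.length lang f i mask = mask.take i ++ fsmB lang .normal (cs.drop i))
    (hij : i < j) (hjn : j ≤ cs.length) (hm : cs.length - i ≤ f + 1)
    (hlen : mask.length = cs.length)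
    (hdrop : mask.drop i = List.replicate (cs.length - i) false) :
    loopA cs cs.length lang f j (markA cs.length mask i j)
      = mask.take i ++ (List.replicate (j - i) true ++ fsmB lang .normal (cs.drop j)) := by
  have hmark := markA_eq mask cs.length i j hlen (by omega) hjn
  have hdj : mask.drop j = List.replicate (cs.length - j) false := by
    have h1 : mask.drop j = (mask.drop i).drop (j - i) := by
      rw [List.drop_drop]; congr 1; omega
    rw [h1, hdrop, List.drop_replicate]; congr 1; omega
  have hXR : ((mask.take i) ++ List.replicate (j - i) true).length = j := by
    simp [hlen]; omega
  have hlen2 : (markA cs.length mask i j).length = cs.length := by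
    rw [hmark]; simp [hlen]; omega
  have hdrop2 : (markA cs.length mask i j).drop j = List.replicate (cs.length - j) false := by
    rw [hmark, List.drop_append, List.drop_eq_nil_of_le (by omega), hXR, Nat.sub_self,
      List.drop_zero, List.nil_append, hdj]
  have htake2 : (markA cs.length mask i j).take j = mask.take i ++ List.replicate (j - i) true := by
    rw [hmark, List.take_left' hXR]
  rw [ih j _ (by omega) hlen2 hdrop2, htake2, List.append_assoc]

theorem loopA_eq (cs : List Char) (lang : String) : ∀ (f i : Nat) (mask : List Bool),
    cs.length - i ≤ f → mask.length = cs.length →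
    mask.drop i = List.replicate (cs.length - i) false →
    loopA cs cs.length lang f i mask = mask.take i ++ fsmB lang .normal (cs.drop i) := by
  intro f
  induction f with
  | zero =>
      intro i mask hfuel hlen hdrop
      rw [loopA, List.take_of_length_le (by omega), List.drop_eq_nil_of_le (by omega)]
      simp [fsmB]
  | succ f ih =>
      intro i mask hfuel hlen hdrop
      by_cases hi : i < cs.length
      · rw [loopA]
        simp only [if_pos hi]
        have hdropi := drop_cons_getD cs i hi
        have htk : (cs.drop i).take 2 = cs.getD i ' ' :: (cs.drop (i+1)).take 1 := by
          rw [hdropi, List.take_succ_cons]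
        by_cases hb1 : (cs.drop i).take 2 = ['/', '/'] ∧ lang = "js"
        · rw [if_pos hb1]
          have hcc : cs.getD i ' ' :: (cs.drop (i+1)).take 1 = ['/', '/'] := htk ▸ hb1.1
          simp only [List.cons.injEq] at hcc
          have hc : cs.getD i ' ' = '/' := hcc.1
          have ht1 : (cs.drop (i+1)).take 1 = ['/'] := hcc.2
          have hi1 : i + 1 < cs.length := by
            by_contra hx
            rw [List.drop_eq_nil_of_le (by omega)] at ht1; simp at ht1
          have hge : i + 2 ≤ lineEndA cs cs.length cs.length (i+2) :=
            lineEndA_ge cs cs.length cs.length (i+2)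
          have hle : lineEndA cs cs.length cs.length (i+2) ≤ cs.length := by
            have := lineEndA_le cs cs.length cs.length (i+2); omega
          rw [mark_step cs lang f i _ mask ih (by omega) hle hfuel hlen hdrop]
          have hgd1 : cs.getD (i+1) ' ' = '/' := by
            rw [drop_cons_getD cs (i+1) hi1, List.take_succ_cons, List.take_zero] at ht1
            simpa using ht1
          have hfsm : fsmB lang .normal (cs.drop i)
              = List.replicate (lineEndA cs cs.length cs.length (i+2) - i) true
                ++ fsmB lang .normal (cs.drop (lineEndA cs cs.length cs.length (i+2))) := by
            rw [hdropi]
            simp only [fsmB]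
            rw [if_pos ⟨hb1.2, hc, head?_of_take_one _ _ ht1⟩]
            rw [drop_cons_getD cs (i+1) hi1]
            simp only [fsmB]
            rw [if_neg (by rw [hgd1]; decide)]
            rw [fsm_line lang cs cs.length (i+2) (by omega)]
            rw [(by omega : lineEndA cs cs.length cs.length (i+2) - i
                  = (lineEndA cs cs.length cs.length (i+2) - (i+2)) + 1 + 1),
              List.replicate_succ, List.replicate_succ]
            simp
          rw [hfsm]
        · rw [if_neg hb1]
          by_cases hb2 : (cs.drop i).take 2 = ['/', '*'] ∧ lang = "js"
          · rw [if_pos hb2]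
            have hcc : cs.getD i ' ' :: (cs.drop (i+1)).take 1 = ['/', '*'] := htk ▸ hb2.1
            simp only [List.cons.injEq] at hcc
            have hc : cs.getD i ' ' = '/' := hcc.1
            have ht1 : (cs.drop (i+1)).take 1 = ['*'] := hcc.2
            have hi1 : i + 1 < cs.length := by
              by_contra hx
              rw [List.drop_eq_nil_of_le (by omega)] at ht1; simp at ht1
            have hgeb : i + 2 ≤ blockEndA cs cs.length cs.length (i+2) :=
              blockEndA_ge cs cs.length cs.length (i+2)
            have hge : i + 2 ≤ min cs.length (blockEndA cs cs.length cs.length (i+2) + 2) := by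
              omega
            have hle : min cs.length (blockEndA cs cs.length cs.length (i+2) + 2) ≤ cs.length :=
              Nat.min_le_left _ _
            rw [mark_step cs lang f i _ mask ih (by omega) hle hfuel hlen hdrop]
            have hfsm : fsmB lang .normal (cs.drop i)
                = List.replicate
                    (min cs.length (blockEndA cs cs.length cs.length (i+2) + 2) - i) true
                  ++ fsmB lang .normal
                      (cs.drop (min cs.length (blockEndA cs cs.length cs.length (i+2) + 2))) := by
              rw [hdropi]
              simp only [fsmB]
              rw [if_neg (by
                rintro ⟨-, -, hx⟩
                rw [head?_of_take_one _ _ ht1] at hx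
                simp at hx)]
              rw [if_pos ⟨hb2.2, hc, head?_of_take_one _ _ ht1⟩]
              rw [drop_cons_getD cs (i+1) hi1]
              simp only [fsmB]
              rw [fsm_block lang cs cs.length (i+2) (by omega) false (by simp)]
              rw [(by omega : min cs.length (blockEndA cs cs.length cs.length (i+2) + 2) - i
                    = (min cs.length (blockEndA cs cs.length cs.length (i+2) + 2) - (i+2)) + 1 + 1),
                List.replicate_succ, List.replicate_succ]
              simp
            rw [hfsm]
          · rw [if_neg hb2]
            by_cases hb3 : cs.getD i ' ' = '`' ∧ lang = "js"
            · rw [if_pos hb3]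
              have hge : i + 1 ≤ strEndA cs cs.length '`' cs.length (i+1) false :=
                strEndA_ge cs cs.length '`' cs.length (i+1) false
              have hle : strEndA cs cs.length '`' cs.length (i+1) false ≤ cs.length := by
                have := strEndA_le cs cs.length '`' cs.length (i+1) false; omega
              rw [mark_step cs lang f i _ mask ih (by omega) hle hfuel hlen hdrop]
              have hfsm : fsmB lang .normal (cs.drop i)
                  = List.replicate (strEndA cs cs.length '`' cs.length (i+1) false - i) true
                    ++ fsmB lang .normal
                        (cs.drop (strEndA cs cs.length '`' cs.length (i+1) false)) := by
                rw [hdropi]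
                simp only [fsmB]
                rw [if_neg (by rintro ⟨-, hx, -⟩; rw [hb3.1] at hx; exact absurd hx (by decide))]
                rw [if_neg (by rintro ⟨-, hx, -⟩; rw [hb3.1] at hx; exact absurd hx (by decide))]
                rw [if_pos (Or.inl ⟨hb3.2, hb3.1⟩)]
                rw [hb3.1]
                rw [fsm_str lang cs '`' cs.length (i+1) (by omega) false]
                rw [(by omega : strEndA cs cs.length '`' cs.length (i+1) false - i
                      = (strEndA cs cs.length '`' cs.length (i+1) false - (i+1)) + 1),
                  List.replicate_succ]
                simp
              rw [hfsm]
            · rw [if_neg hb3]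
              by_cases hb4 : cs.getD i ' ' = '\'' ∨ cs.getD i ' ' = '"'
              · rw [if_pos hb4]
                have hge : i + 1 ≤ strEndA cs cs.length (cs.getD i ' ') cs.length (i+1) false :=
                  strEndA_ge cs cs.length (cs.getD i ' ') cs.length (i+1) false
                have hle : strEndA cs cs.length (cs.getD i ' ') cs.length (i+1) false
                    ≤ cs.length := by
                  have := strEndA_le cs cs.length (cs.getD i ' ') cs.length (i+1) false; omega
                rw [mark_step cs lang f i _ mask ih (by omega) hle hfuel hlen hdrop]
                have hnotsl : ¬ cs.getD i ' ' = '/' := by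
                  rcases hb4 with h4 | h4 <;> rw [h4] <;> decide
                have hfsm : fsmB lang .normal (cs.drop i)
                    = List.replicate
                        (strEndA cs cs.length (cs.getD i ' ') cs.length (i+1) false - i) true
                      ++ fsmB lang .normal
                          (cs.drop (strEndA cs cs.length (cs.getD i ' ') cs.length (i+1) false)) := by
                  rw [hdropi]
                  simp only [fsmB]
                  rw [if_neg (by rintro ⟨-, hx, -⟩; exact hnotsl hx)]
                  rw [if_neg (by rintro ⟨-, hx, -⟩; exact hnotsl hx)]
                  rw [if_pos (Or.inr hb4)]
                  rw [fsm_str lang cs (cs.getD i ' ') cs.length (i+1) (by omega) false]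
                  rw [(by omega : strEndA cs cs.length (cs.getD i ' ') cs.length (i+1) false - i
                        = (strEndA cs cs.length (cs.getD i ' ') cs.length (i+1) false - (i+1)) + 1),
                    List.replicate_succ]
                  simp
                rw [hfsm]
              · rw [if_neg hb4]
                have hdrop1 : mask.drop (i+1) = List.replicate (cs.length - (i+1)) false := by
                  have h1 : mask.drop (i+1) = (mask.drop i).drop 1 := by
                    rw [List.drop_drop]
                  rw [h1, hdrop, List.drop_replicate]; congr 1
                rw [ih (i+1) mask (by omega) hlen hdrop1]
                have hgm : mask[i]? = some false := by
                  have h0 : mask[i + 0]? = (List.replicate (cs.length - i) false)[0]? := by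
                    rw [← List.getElem?_drop, hdrop]
                  simpa [List.getElem?_replicate, show 0 < cs.length - i by omega] using h0
                have htke : mask.take (i+1) = mask.take i ++ [false] := by
                  rw [List.take_add_one, hgm]; rfl
                have hfsm : fsmB lang .normal (cs.drop i)
                    = false :: fsmB lang .normal (cs.drop (i+1)) := by
                  rw [hdropi]
                  simp only [fsmB]
                  rw [if_neg (by
                    rintro ⟨hl, hcx, hhx⟩
                    exact hb1 ⟨by rw [htk, hcx, (take_one_eq_iff_head? _ _).2 hhx], hl⟩)]
                  rw [if_neg (by
                    rintro ⟨hl, hcx, hhx⟩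
                    exact hb2 ⟨by rw [htk, hcx, (take_one_eq_iff_head? _ _).2 hhx], hl⟩)]
                  rw [if_neg (by
                    rintro (⟨hl, hcx⟩ | hx | hx)
                    · exact hb3 ⟨hcx, hl⟩
                    · exact hb4 (Or.inl hx)
                    · exact hb4 (Or.inr hx))]
                rw [hfsm, htke]
                simp
      · rw [loopA, if_neg hi, List.take_of_length_le (by omega),
          List.drop_eq_nil_of_le (by omega)]
        simp [fsmB]

-- ===== VERDICT (by name: the statement is the Claim_ definition above) =====
theorem scan_mask_py_spec : Claim_equal_scan_mask_py := by
  intro text lang _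
  unfold Spec_scan_mask_py scan_mask_py scan_mask_py_alt
  rw [loopA_eq text.toList lang text.toList.length 0 _ (by omega) (by simp) (by simp)]
  simp
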